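-- pv_equiv track=rewrite | github.com/jvfdalmas/ITS.CyberSec.Esercitazione | Ripasso_Esame/lezione5_valutazione.py | count_isolated
-- ===== SOURCE A (Python) =====
-- def count_isolated(arr: list[int]) -> int:
--     counter = 0
--
--     if len(arr) == 0:
--         return counter
--     if len(arr) == 1:
--         return counter + 1
--
--     if arr[0] != arr[1]: #control first element
--         counter += 1
--
--     for i in range(1,len(arr)-1):
--         if arr[i-1] != arr[i] and arr[1+i] != arr[i]:
--             counter += 1
--
--     if arr[-1] != arr[-2]: #control last element
--         counter += 1
--
--     return counter
-- ===== SOURCE B (Python) =====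
-- def count_isolated(arr: list[int]) -> int:
--     # Run-length view: an element is isolated iff its maximal run of equal
--     # consecutive elements has length exactly 1; count such runs.
--     count = 0
--     i = 0
--     n = len(arr)
--     while i < n:
--         j = i + 1
--         while j < n and arr[j] == arr[i]:
--             j += 1
--         if j - i == 1:
--             count += 1
--         i = j
--     return count
-- ===== Notes on version B (the rewrite author's own statement) =====
-- stated objective: alternative
-- what changed: B decomposes the list into maximal runs of equal consecutive elements and counts the runs of length 1, instead of A's per-index comparison against both neighbors with four boundary special cases.
import Mathlib
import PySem

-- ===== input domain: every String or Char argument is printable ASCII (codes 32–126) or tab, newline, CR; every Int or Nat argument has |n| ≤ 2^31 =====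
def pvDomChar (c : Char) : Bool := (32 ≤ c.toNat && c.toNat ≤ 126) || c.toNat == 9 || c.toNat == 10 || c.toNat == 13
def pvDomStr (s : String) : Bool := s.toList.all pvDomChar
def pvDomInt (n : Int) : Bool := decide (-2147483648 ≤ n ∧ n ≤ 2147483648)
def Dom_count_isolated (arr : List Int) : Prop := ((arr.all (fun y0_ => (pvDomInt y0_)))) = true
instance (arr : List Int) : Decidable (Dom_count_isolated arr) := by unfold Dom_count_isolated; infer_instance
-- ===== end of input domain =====

-- B decomposes the list into maximal runs of equal consecutive elements and counts
-- the runs of length 1, instead of A's per-index neighbor comparisons with boundary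
-- special cases (objective: alternative).

-- ===== PORT A =====
def count_isolated (arr : List Int) : Int :=
  let counter : Int := 0
  if arr.length = 0 then counter
  else if arr.length = 1 then counter + 1
  else
    let counter := if PySem.List.pyGetD arr 0 0 ≠ PySem.List.pyGetD arr 1 0 then counter + 1 else counter
    let counter := (PySem.List.pyRange 1 (PySem.List.len arr - 1) 1).foldl
      (fun c i => if PySem.List.pyGetD arr (i-1) 0 ≠ PySem.List.pyGetD arr i 0 ∧
                     PySem.List.pyGetD arr (1+i) 0 ≠ PySem.List.pyGetD arr i 0 then c + 1 else c) counter
    let counter := if PySem.List.pyGetD arr (-1) 0 ≠ PySem.List.pyGetD arr (-2) 0 then counter + 1 else counter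
    counter

-- ===== PORT B =====
-- the inner `while j < n and arr[j] == arr[i]` scan: length of the current run's
-- remainder and the list that follows the run
def pvRun (x : Int) : List Int → Nat × List Int
  | [] => (0, [])
  | y :: r => if y = x then ((pvRun x r).1 + 1, (pvRun x r).2) else (0, y :: r)

lemma pvRun_len (x : Int) (l : List Int) : (pvRun x l).2.length ≤ l.length := by
  induction l with
  | nil => simp [pvRun]
  | cons y r ih =>
      simp only [pvRun]
      split
      · exact le_trans ih (by simp)
      · simp

-- the outer `while i < n` loop: one iteration per maximal run, accumulating count
def pvRunsLoop (count : Int) (l : List Int) : Int :=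
  match l with
  | [] => count
  | x :: rest =>
      pvRunsLoop (if (pvRun x rest).1 = 0 then count + 1 else count) (pvRun x rest).2
termination_by l.length
decreasing_by exact Nat.lt_succ_of_le (pvRun_len x rest)

def count_isolated_alt (arr : List Int) : Int := pvRunsLoop 0 arr

-- ===== PRECONDITION & SPEC =====
def Spec_count_isolated (arr : List Int) (out : Int) : Prop := out = count_isolated_alt arr
instance (arr : List Int) (out : Int) : Decidable (Spec_count_isolated arr out) := by unfold Spec_count_isolated; infer_instance

-- ===== CLAIM (what is proved, stated in full; the proofs are below) =====
def Claim_equal_count_isolated : Prop := ∀ (arr : List Int), Dom_count_isolated arr → Spec_count_isolated arr (count_isolated arr)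

-- ===== LEMMAS AND PROOFS =====

-- common spec: count of elements different from the previous element (prev, as an Option)
-- and from the next one (none at the end)
def pvG : Option Int → List Int → Int
  | _, [] => 0
  | prev, [x] => if some x ≠ prev then 1 else 0
  | prev, x :: y :: r => (if some x ≠ prev ∧ x ≠ y then 1 else 0) + pvG (some x) (y :: r)

-- triple-window scan over an Option-padded list (bridge between A's loop and pvG)
def pvTriples : List (Option Int) → Int
  | x :: y :: z :: rest => (if y ≠ x ∧ y ≠ z then 1 else 0) + pvTriples (y :: z :: rest)
  | _ => 0

-- interior count: indicator of each middle element differing from both neighbours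
def pvMidLoop : Int → Int → List Int → Int
  | _, _, [] => 0
  | a, b, c :: rest => (if a ≠ b ∧ c ≠ b then 1 else 0) + pvMidLoop b c rest

-- last and second-to-last element of a::b::l
def pvLastVal : Int → Int → List Int → Int
  | _, b, [] => b
  | _, b, c :: r => pvLastVal b c r

def pvLast2Val : Int → Int → List Int → Int
  | a, _, [] => a
  | _, b, c :: r => pvLast2Val b c r

lemma pv_getLast?_cons2 (l : List Int) : ∀ (a b : Int),
    (a :: b :: l).getLast? = some (pvLastVal a b l) := by
  induction l with
  | nil => intro a b; simp [pvLastVal]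
  | cons c rest ih =>
      intro a b
      rw [List.getLast?_cons_cons]
      exact ih b c

lemma pv_getElem?_len (l : List Int) : ∀ (a b : Int),
    (a :: b :: l)[l.length]? = some (pvLast2Val a b l) := by
  induction l with
  | nil => intro a b; simp [pvLast2Val]
  | cons c rest ih =>
      intro a b
      have h : (c :: rest).length = rest.length + 1 := rfl
      rw [h, List.getElem?_cons_succ]
      exact ih b c

lemma pv_lastVal (l : List Int) (a b : Int) :
    PySem.List.pyGetD (a :: b :: l) (-1) 0 = pvLastVal a b l := by
  simp only [PySem.List.pyGetD]
  rw [PySem.List.pyGet?_neg_one, pv_getLast?_cons2]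
  rfl

lemma pv_last2Val (l : List Int) (a b : Int) :
    PySem.List.pyGetD (a :: b :: l) (-2) 0 = pvLast2Val a b l := by
  simp only [PySem.List.pyGetD]
  rw [PySem.List.pyGet?_neg_ofNat _ 2 (by omega) (by simp)]
  have hl : (a :: b :: l).length - 2 = l.length := by simp
  rw [hl, pv_getElem?_len]
  rfl

lemma pvTriples_padded (l : List Int) : ∀ (a b : Int),
    pvTriples (some a :: some b :: (l.map some ++ [none]))
      = pvMidLoop a b l + (if pvLastVal a b l ≠ pvLast2Val a b l then 1 else 0) := by
  induction l with
  | nil =>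
      intro a b
      simp [pvTriples, pvMidLoop, pvLastVal, pvLast2Val]
  | cons c rest ih =>
      intro a b
      have step : pvTriples (some a :: some b :: ((c :: rest).map some ++ [none]))
          = (if b ≠ a ∧ b ≠ c then 1 else 0)
            + pvTriples (some b :: some c :: (rest.map some ++ [none])) := by
        simp [pvTriples]
      rw [step, ih b c]
      have hcond : (b ≠ a ∧ b ≠ c) ↔ (a ≠ b ∧ c ≠ b) := by
        constructor <;> exact fun ⟨h1, h2⟩ => ⟨h1.symm, h2.symm⟩
      simp only [pvMidLoop, pvLastVal, pvLast2Val]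
      rw [if_congr hcond rfl rfl, add_assoc]
      rfl

lemma pv_loopA (l : List Int) : ∀ (a b : Int) (c0 : Int),
    (List.range l.length).foldl
      (fun c k => if (a::b::l).getD k 0 ≠ (a::b::l).getD (k+1) 0 ∧
                     (a::b::l).getD (k+2) 0 ≠ (a::b::l).getD (k+1) 0 then c + 1 else c) c0
      = c0 + pvMidLoop a b l := by
  induction l with
  | nil => intro a b c0; simp [pvMidLoop]
  | cons c rest ih =>
      intro a b c0
      rw [show (c :: rest).length = rest.length + 1 from rfl, List.range_succ_eq_map,
          List.foldl_cons, List.foldl_map]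
      simp only [List.getD_cons_zero, List.getD_cons_succ, Nat.succ_eq_add_one]
      have ih' := ih b c (if a ≠ b ∧ c ≠ b then c0 + 1 else c0)
      simp only [List.getD_cons_succ] at ih'
      rw [ih']
      simp only [pvMidLoop]
      split <;> ring

-- A equals the triple-window scan of the padded list
lemma pvA_eq_triples (arr : List Int) :
    count_isolated arr = pvTriples (none :: (arr.map some ++ [none])) := by
  match arr with
  | [] => simp [count_isolated, pvTriples]
  | [a] => simp [count_isolated, pvTriples]
  | a :: b :: l =>
      have hB : pvTriples (none :: ((a :: b :: l).map some ++ [none]))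
          = (if a ≠ b then 1 else 0)
            + (pvMidLoop a b l + (if pvLastVal a b l ≠ pvLast2Val a b l then 1 else 0)) := by
        have step : pvTriples (none :: ((a :: b :: l).map some ++ [none]))
            = (if a ≠ b then 1 else 0)
              + pvTriples (some a :: some b :: (l.map some ++ [none])) := by
          simp [pvTriples]
        rw [step, pvTriples_padded l a b]
      rw [hB]
      show count_isolated (a :: b :: l) = _
      rw [count_isolated]
      simp only [List.length_cons]
      rw [if_neg (by omega), if_neg (by omega)]
      have hlen : PySem.List.len (a :: b :: l) - 1 = ((l.length + 1 : Nat) : Int) := by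
        simp [PySem.List.len_eq]
      rw [hlen, PySem.List.pyRange_one]
      have htonat : (((l.length + 1 : Nat) : Int) - 1).toNat = l.length := by omega
      rw [htonat, List.foldl_map]
      have hfun : (fun (c : Int) (k : Nat) =>
          if PySem.List.pyGetD (a::b::l) ((1 + (k:Int)) - 1) 0 ≠ PySem.List.pyGetD (a::b::l) (1 + (k:Int)) 0 ∧
             PySem.List.pyGetD (a::b::l) (1 + (1 + (k:Int))) 0 ≠ PySem.List.pyGetD (a::b::l) (1 + (k:Int)) 0
          then c + 1 else c)
          = (fun (c : Int) (k : Nat) =>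
          if (a::b::l).getD k 0 ≠ (a::b::l).getD (k+1) 0 ∧
             (a::b::l).getD (k+2) 0 ≠ (a::b::l).getD (k+1) 0 then c + 1 else c) := by
        funext c k
        have h1 : (1 + (k:Int)) - 1 = ((k : Nat) : Int) := by ring
        have h2 : 1 + (k:Int) = ((k + 1 : Nat) : Int) := by push_cast; ring
        rw [h1, h2]
        rw [show (1 : Int) + ((k + 1 : Nat) : Int) = ((k + 2 : Nat) : Int) by push_cast; ring]
        simp only [PySem.List.pyGetD_natCast]
      rw [hfun, pv_loopA l a b]
      rw [pv_lastVal l a b, pv_last2Val l a b]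
      have h0 : PySem.List.pyGetD (a :: b :: l) 0 0 = a := PySem.List.pyGetD_zero_cons _ _ _
      have h1 : PySem.List.pyGetD (a :: b :: l) 1 0 = b := by
        rw [PySem.List.pyGetD_ofNat']
        simp
      rw [h0, h1]
      split <;> split <;> ring

-- triple scan = pvG
lemma pvTriples_eq_G (l : List Int) : ∀ (prev : Option Int) (x : Int),
    pvTriples (prev :: some x :: (l.map some ++ [none])) = pvG prev (x :: l) := by
  induction l with
  | nil =>
      intro prev x
      simp [pvTriples, pvG]
  | cons y r ih =>
      intro prev x
      have step : pvTriples (prev :: some x :: ((y :: r).map some ++ [none]))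
          = (if some x ≠ prev ∧ some x ≠ some y then 1 else 0)
            + pvTriples (some x :: some y :: (r.map some ++ [none])) := by
        simp [pvTriples]
      rw [step, ih (some x) y]
      simp [pvG]

-- remainder of a run starts with a different value
lemma pvRun_head (x : Int) (l : List Int) : ∀ y r, (pvRun x l).2 = y :: r → y ≠ x := by
  induction l with
  | nil => intro y r h; simp [pvRun] at h
  | cons z t ih =>
      intro y r h
      by_cases hz : z = x
      · simp only [pvRun, if_pos hz] at h
        exact ih y r h
      · simp only [pvRun, if_neg hz] at h
        injection h with h1 h2
        exact h1 ▸ hz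

-- consuming the rest of a run after its first element contributes nothing
lemma pvG_skip_run (x : Int) (r : List Int) :
    pvG (some x) (x :: r) = pvG (some x) (pvRun x r).2 := by
  induction r with
  | nil => simp [pvG, pvRun]
  | cons y r' ih =>
      by_cases hy : y = x
      · subst hy
        simp only [pvG, pvRun]
        simpa using ih
      · simp only [pvG, pvRun, if_neg hy]
        have : ¬ (some x ≠ some x ∧ x ≠ y) := by simp
        rw [if_neg this]
        ring

-- peeling one maximal run off the front
lemma pvG_run (prev : Option Int) (x : Int) (rest : List Int) (hprev : prev ≠ some x) :
    pvG prev (x :: rest)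
      = (if (pvRun x rest).1 = 0 then 1 else 0) + pvG (some x) (pvRun x rest).2 := by
  cases rest with
  | nil =>
      have hx : some x ≠ prev := fun h => hprev (Eq.symm h)
      simp [pvG, pvRun, hx]
  | cons y r =>
      by_cases hy : y = x
      · subst hy
        have hne : ¬ (some y ≠ prev ∧ y ≠ y) := by simp
        simp only [pvG, if_neg hne, pvRun]
        rw [show pvG (some y) (y :: r) = pvG (some y) (pvRun y r).2 from pvG_skip_run y r]
        simp
      · simp only [pvRun, if_neg hy]
        have hcond : (some x ≠ prev ∧ x ≠ y) :=
          ⟨by intro h; exact hprev (Eq.symm h), by intro h; exact hy (Eq.symm h)⟩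
        simp only [pvG, if_pos hcond]
        simp

-- the outer run loop computes pvG (strong induction on length)
lemma pvRunsLoop_eq_G : ∀ (n : Nat) (l : List Int), l.length ≤ n →
    ∀ (c : Int) (prev : Option Int),
    (∀ y r, l = y :: r → prev ≠ some y) →
    pvRunsLoop c l = c + pvG prev l := by
  intro n
  induction n with
  | zero =>
      intro l hl c prev _
      have : l = [] := List.eq_nil_of_length_eq_zero (Nat.le_zero.mp hl)
      subst this
      simp [pvRunsLoop, pvG]
  | succ n ih =>
      intro l hl c prev hprev
      cases l with
      | nil => simp [pvRunsLoop, pvG]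
      | cons x rest =>
          rw [pvRunsLoop]
          have hlen : (pvRun x rest).2.length ≤ n := by
            have := pvRun_len x rest
            simp at hl
            omega
          have hrec := ih (pvRun x rest).2 hlen
            (if (pvRun x rest).1 = 0 then c + 1 else c) (some x)
            (by
              intro y r h hxy
              exact pvRun_head x rest y r h (Option.some.inj hxy).symm)
          rw [hrec, pvG_run prev x rest (hprev x rest rfl)]
          split <;> ring

-- ===== VERDICT (by name: the statement is the Claim_ definition above) =====
theorem count_isolated_spec : Claim_equal_count_isolated := by
  intro arr _
  unfold Spec_count_isolated
  rw [pvA_eq_triples, count_isolated_alt]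
  cases arr with
  | nil => simp [pvTriples, pvRunsLoop]
  | cons x rest =>
      simp only [List.map_cons, List.cons_append]
      rw [pvTriples_eq_G rest none x,
          pvRunsLoop_eq_G (x :: rest).length (x :: rest) le_rfl 0 none (by simp)]
      ring
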